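-- pv_equiv track=rewrite | github.com/vibhorkumar1209/organogram-engine | backend/organogram/utils/rule_loader.py | _is_word_match
-- ===== SOURCE A (Python) =====
-- def _is_word_match(needle: str, haystack: str) -> bool:
--     """True if `needle` appears in `haystack` on word boundaries."""
--     if needle not in haystack:
--         return False
--     # Quick check: tokens separated by spaces, dashes, slashes, parens
--     sep_chars = " \t-/().,"
--     idx = 0
--     while True:
--         pos = haystack.find(needle, idx)
--         if pos == -1:
--             return False
--         before = haystack[pos - 1] if pos > 0 else " "
--         after_idx = pos + len(needle)
--         after = haystack[after_idx] if after_idx < len(haystack) else " "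
--         if before in sep_chars and after in sep_chars:
--             return True
--         idx = pos + 1
-- ===== SOURCE B (Python) =====
-- def _is_word_match(needle: str, haystack: str) -> bool:
--     """True if `needle` appears in `haystack` on word boundaries."""
--     sep = " \t-/().,"
--     n, h = len(needle), len(haystack)
--     return any(
--         haystack[i:i + n] == needle
--         and (i == 0 or haystack[i - 1] in sep)
--         and (i + n == h or haystack[i + n] in sep)
--         for i in range(h - n + 1)
--     )
-- ===== Notes on version B (the rewrite author's own statement) =====
-- stated objective: simpler
-- what changed: Replaces the stateful find/advance loop (repeated haystack.find with an index cursor and an initial substring pre-check) by a single declarative any() over all candidate start positions, comparing the slice and the two boundary characters directly.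
import Mathlib
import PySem

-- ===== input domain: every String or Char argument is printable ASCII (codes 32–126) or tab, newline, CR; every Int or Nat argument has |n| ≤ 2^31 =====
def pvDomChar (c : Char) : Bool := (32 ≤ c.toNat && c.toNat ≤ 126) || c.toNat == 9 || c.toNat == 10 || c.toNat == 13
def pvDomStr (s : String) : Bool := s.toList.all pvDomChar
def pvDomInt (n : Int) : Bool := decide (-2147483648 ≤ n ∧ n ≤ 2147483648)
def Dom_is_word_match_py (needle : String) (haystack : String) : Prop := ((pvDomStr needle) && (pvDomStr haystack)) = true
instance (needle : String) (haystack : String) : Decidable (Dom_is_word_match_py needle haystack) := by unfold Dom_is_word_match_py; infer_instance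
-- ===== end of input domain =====

-- B replaces A's stateful find/advance cursor loop by one declarative any() over all
-- candidate start positions (objective: simpler); same return value, no side effects.

-- ===== PORT A =====
-- sep_chars = " \t-/()., " as a list of its characters (shared by both ports)
def pvSep : List Char := [' ', '\t', '-', '/', '(', ')', '.', ',']

-- the `while True` loop of A, with `idx` as the cursor; `fuel` is a totality guard only:
-- each Python iteration strictly increases idx and find returns -1 once idx > len(haystack),
-- so with the initial fuel below the 0-fuel branch is never reached (proved in pvA_loop_iff)
def pvLoopA (needle haystack : List Char) (fuel : Nat) (idx : Nat) : Bool :=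
  match fuel with
  | 0 => false
  | fuel + 1 =>
    let pos := PySem.Chars.findFrom haystack needle (idx : Int)
    if pos = -1 then false
    else
      let p := pos.toNat
      let before := if 0 < p then haystack.getD (p - 1) ' ' else ' '
      let afterIdx := p + needle.length
      let after := if afterIdx < haystack.length then haystack.getD afterIdx ' ' else ' '
      if pvSep.contains before && pvSep.contains after then true
      else pvLoopA needle haystack fuel (p + 1)

def is_word_match_py (needle : String) (haystack : String) : Bool :=
  let n := needle.toList
  let h := haystack.toList
  if ! PySem.Chars.isIn n h then false
  else pvLoopA n h (h.length + 1) 0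

-- ===== PORT B =====
def is_word_match_py_alt (needle : String) (haystack : String) : Bool :=
  let n := needle.toList
  let h := haystack.toList
  (PySem.List.pyRange 0 ((h.length : Int) - (n.length : Int) + 1)).any fun i =>
    decide (PySem.List.slice h (some i) (some (i + (n.length : Int))) = n)
    && (decide (i = 0) || pvSep.contains (PySem.List.pyGetD h (i - 1) ' '))
    && (decide (i + (n.length : Int) = (h.length : Int))
        || pvSep.contains (PySem.List.pyGetD h (i + (n.length : Int)) ' '))

-- ===== PRECONDITION & SPEC =====
def Spec_is_word_match_py (needle : String) (haystack : String) (out : Bool) : Prop := out = is_word_match_py_alt needle haystack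
instance (needle : String) (haystack : String) (out : Bool) : Decidable (Spec_is_word_match_py needle haystack out) := by unfold Spec_is_word_match_py; infer_instance

-- ===== CLAIM (what is proved, stated in full; the proofs are below) =====
def Claim_equal_is_word_match_py : Prop := ∀ (needle : String) (haystack : String), Dom_is_word_match_py needle haystack → Spec_is_word_match_py needle haystack (is_word_match_py needle haystack)

-- ===== LEMMAS AND PROOFS =====

-- find past the end returns -1
theorem pvFindFrom_past (s sub : List Char) (k : Nat) (h : s.length < k) :
    PySem.Chars.findFrom s sub (k : Int) = -1 := by
  simp [PySem.Chars.findFrom]; omega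

-- common characterisation: position i is a boundary-valid occurrence
def pvOK (n h : List Char) (i : Nat) : Prop :=
  n <+: h.drop i ∧ i + n.length ≤ h.length ∧
  pvSep.contains (if 0 < i then h.getD (i - 1) ' ' else ' ') = true ∧
  pvSep.contains (if i + n.length < h.length then h.getD (i + n.length) ' ' else ' ') = true

theorem pvOK_not_of_gt (n h : List Char) (i : Nat) (hgt : h.length < i + n.length) :
    ¬ pvOK n h i := fun hok => absurd hok.2.1 (by omega)

theorem pvSep_space : pvSep.contains ' ' = true := by decide

theorem pvSlice_eq (h : List Char) (j m : Nat) :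
    PySem.List.slice h (some (j : Int)) (some ((j : Int) + (m : Int))) = (h.drop j).take m := by
  have hs := PySem.List.slice_natCast h j (j + m)
  push_cast at hs
  rw [hs]
  congr 1
  omega

theorem pvB_iff' (n h : List Char) :
    ((PySem.List.pyRange 0 ((h.length : Int) - (n.length : Int) + 1)).any fun i =>
      decide (PySem.List.slice h (some i) (some (i + (n.length : Int))) = n)
      && (decide (i = 0) || pvSep.contains (PySem.List.pyGetD h (i - 1) ' '))
      && (decide (i + (n.length : Int) = (h.length : Int))
          || pvSep.contains (PySem.List.pyGetD h (i + (n.length : Int)) ' '))) = true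
    ↔ ∃ i : Nat, pvOK n h i := by
  rw [List.any_eq_true]
  constructor
  · rintro ⟨i, hmem, hpred⟩
    rw [PySem.List.mem_pyRange_one] at hmem
    obtain ⟨h0, hlt⟩ := hmem
    obtain ⟨j, rfl⟩ := Int.eq_ofNat_of_zero_le h0
    simp only [Bool.and_eq_true, Bool.or_eq_true, decide_eq_true_eq] at hpred
    obtain ⟨⟨hslice, hbef⟩, haft⟩ := hpred
    have hjle : j + n.length ≤ h.length := by omega
    rw [pvSlice_eq] at hslice
    refine ⟨j, ?_, hjle, ?_, ?_⟩
    · rw [List.prefix_iff_eq_take]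
      exact hslice.symm
    · by_cases hj0 : j = 0
      · subst hj0
        simpa using pvSep_space
      · have hc : pvSep.contains (PySem.List.pyGetD h ((j : Int) - 1) ' ') = true := by
          rcases hbef with h0' | hc
          · exact absurd (by exact_mod_cast h0') hj0
          · exact hc
        rw [show ((j : Int) - 1) = ((j - 1 : Nat) : Int) by omega,
          PySem.List.pyGetD_natCast] at hc
        simpa [Nat.pos_of_ne_zero hj0] using hc
    · by_cases hc2 : j + n.length < h.length
      · have hc : pvSep.contains (PySem.List.pyGetD h ((j : Int) + (n.length : Int)) ' ') = true := by
          rcases haft with heq | hc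
          · exfalso
            have : j + n.length = h.length := by exact_mod_cast heq
            omega
          · exact hc
        rw [show ((j : Int) + (n.length : Int)) = ((j + n.length : Nat) : Int) by push_cast; ring,
          PySem.List.pyGetD_natCast] at hc
        simpa [hc2] using hc
      · simpa [hc2] using pvSep_space
  · rintro ⟨j, hpre, hle, hbef, haft⟩
    refine ⟨(j : Int), ?_, ?_⟩
    · rw [PySem.List.mem_pyRange_one]
      constructor
      · omega
      · omega
    · simp only [Bool.and_eq_true, Bool.or_eq_true, decide_eq_true_eq]
      refine ⟨⟨?_, ?_⟩, ?_⟩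
      · rw [pvSlice_eq]
        exact ((List.prefix_iff_eq_take).1 hpre).symm
      · rcases Nat.eq_zero_or_pos j with rfl | hp
        · left; rfl
        · right
          rw [show ((j : Int) - 1) = ((j - 1 : Nat) : Int) by omega, PySem.List.pyGetD_natCast]
          simpa [hp] using hbef
      · by_cases hc2 : j + n.length < h.length
        · right
          rw [show ((j : Int) + (n.length : Int)) = ((j + n.length : Nat) : Int) by push_cast; ring,
            PySem.List.pyGetD_natCast]
          simpa [hc2] using haft
        · left
          have : j + n.length = h.length := by omega
          exact_mod_cast congrArg (Nat.cast : Nat → Int) this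

theorem pvB_iff (needle haystack : String) :
    is_word_match_py_alt needle haystack = true ↔ ∃ i : Nat, pvOK needle.toList haystack.toList i :=
  pvB_iff' needle.toList haystack.toList

-- prefix at a later position implies infix of the earlier suffix
theorem pvPrefix_drop_infix (n h : List Char) (idx i : Nat) (hle : idx ≤ i)
    (hp : n <+: h.drop i) : n <:+: h.drop idx := by
  have heq : h.drop i = (h.drop idx).drop (i - idx) := by
    rw [List.drop_drop]
    congr 1
    omega
  rw [heq] at hp
  exact hp.isInfix.trans (List.drop_suffix _ _).isInfix

theorem pvA_loop_iff (n h : List Char) (fuel idx : Nat) (hfuel : h.length + 1 ≤ fuel + idx) :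
    pvLoopA n h fuel idx = true ↔ ∃ i : Nat, idx ≤ i ∧ pvOK n h i := by
  induction fuel generalizing idx with
  | zero =>
    rw [pvLoopA]
    constructor
    · intro hcon
      exact absurd hcon (by simp)
    · rintro ⟨i, hle, hok⟩
      exact absurd hok (pvOK_not_of_gt n h i (by omega))
  | succ fuel ih =>
    by_cases hpos : PySem.Chars.findFrom h n (idx : Int) = -1
    · rw [pvLoopA, if_pos hpos]
      constructor
      · intro hcon
        exact absurd hcon (by simp)
      · rintro ⟨i, hle, hok⟩
        by_cases hk : idx ≤ h.length
        · rw [PySem.Chars.findFrom_natCast_eq_neg_one_iff h n idx hk] at hpos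
          exact absurd (pvPrefix_drop_infix n h idx i hle hok.1) hpos
        · exact absurd hok (pvOK_not_of_gt n h i (by omega))
    · have hk : idx ≤ h.length := by
        by_contra hgt
        exact hpos (pvFindFrom_past h n idx (by omega))
      obtain ⟨h1, h2, h3⟩ := PySem.Chars.findFrom_natCast_spec h n idx hk hpos
      have hfle : PySem.Chars.findFrom h n (idx : Int) ≤ (h.length : Int) := by
        rw [PySem.Chars.findFrom_natCast h n idx hk]
        have hfl := PySem.Chars.find_le_length (h.drop idx) n
        rw [List.length_drop] at hfl
        split_ifs
        · omega
        · omega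
      rw [pvLoopA, if_neg hpos]
      obtain ⟨p, hp⟩ : ∃ p : Nat, (PySem.Chars.findFrom h n (idx : Int)).toNat = p := ⟨_, rfl⟩
      rw [hp] at h2 h3
      rw [hp]
      have hip : idx ≤ p := by omega
      have hpl : p ≤ h.length := by omega
      have hple : p + n.length ≤ h.length := by
        have hlen := h2.length_le
        rw [List.length_drop] at hlen
        omega
      by_cases hbd : (pvSep.contains (if 0 < p then h.getD (p - 1) ' ' else ' ') &&
          pvSep.contains (if p + n.length < h.length then h.getD (p + n.length) ' ' else ' ')) = true
      · rw [if_pos hbd]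
        simp only [Bool.and_eq_true] at hbd
        exact iff_of_true rfl ⟨p, hip, h2, hple, hbd.1, hbd.2⟩
      · rw [if_neg hbd, ih (p + 1) (by omega)]
        constructor
        · rintro ⟨i, hle, hok⟩
          exact ⟨i, by omega, hok⟩
        · rintro ⟨i, hle, hok⟩
          refine ⟨i, ?_, hok⟩
          rcases Nat.lt_or_ge i (p + 1) with hlt | hge
          · exfalso
            rcases Nat.lt_or_ge i p with hi' | hi'
            · exact h3 i hle hi' hok.1
            · have : i = p := by omega
              subst this
              exact hbd (by rw [Bool.and_eq_true]; exact ⟨hok.2.2.1, hok.2.2.2⟩)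
          · exact hge

theorem pvA_iff' (n h : List Char) :
    (if ! PySem.Chars.isIn n h then false else pvLoopA n h (h.length + 1) 0) = true ↔ ∃ i : Nat, pvOK n h i := by
  by_cases hin : PySem.Chars.isIn n h = true
  · rw [hin]
    simp only [Bool.not_true, Bool.false_eq_true, if_false]
    rw [pvA_loop_iff n h (h.length + 1) 0 (by omega)]
    exact ⟨fun ⟨i, _, hok⟩ => ⟨i, hok⟩, fun ⟨i, hok⟩ => ⟨i, Nat.zero_le i, hok⟩⟩
  · have hfalse : PySem.Chars.isIn n h = false := by simpa using hin
    rw [hfalse]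
    simp only [Bool.not_false, if_true]
    rw [PySem.Chars.isIn_eq_false_iff] at hfalse
    constructor
    · intro hcon
      exact absurd hcon (by simp)
    · rintro ⟨i, hok⟩
      exfalso
      have hinf := pvPrefix_drop_infix n h 0 i (Nat.zero_le i) hok.1
      rw [List.drop_zero] at hinf
      exact hfalse hinf

theorem pvA_iff (needle haystack : String) :
    is_word_match_py needle haystack = true ↔ ∃ i : Nat, pvOK needle.toList haystack.toList i :=
  pvA_iff' needle.toList haystack.toList

-- ===== VERDICT (by name: the statement is the Claim_ definition above) =====
theorem is_word_match_py_spec : Claim_equal_is_word_match_py := by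
  intro needle haystack _
  unfold Spec_is_word_match_py
  rw [Bool.eq_iff_iff, pvA_iff, pvB_iff]
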